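-- pv_equiv track=rewrite | github.com/russpj/TicTacToe | TicTacToe.py | IndexBoard
-- ===== SOURCE A (Python) =====
-- def IndexBoard(board):
-- 	"""
-- 	Assigns a unique index to the board, using base 3 where blanks are 0, O's are 1, and X's are 2
-- 	"""
-- 	def Value(square):
-- 		return 2 if square=='X' else 1 if square=='O' else 0
--
-- 	result = 0
-- 	for row in board:
-- 		for square in row:
-- 			result = result*3 + Value(square)
-- 	return result
-- ===== SOURCE B (Python) =====
-- def IndexBoard(board):
-- 	"""
-- 	Assigns a unique index to the board, using base 3 where blanks are 0, O's are 1, and X's are 2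
-- 	"""
-- 	def Value(square):
-- 		return 2 if square == 'X' else 1 if square == 'O' else 0
--
-- 	squares = [square for row in board for square in row]
-- 	total = 0
-- 	power = 1
-- 	for square in reversed(squares):
-- 		total += Value(square) * power
-- 		power *= 3
-- 	return total
-- ===== Notes on version B (the rewrite author's own statement) =====
-- stated objective: alternative
-- what changed: Replaces the nested most-significant-first Horner multiply-add loop with a flatten of the board followed by a single back-to-front pass that adds Value(square) times an explicitly maintained power-of-three positional weight.
import Mathlib
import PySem

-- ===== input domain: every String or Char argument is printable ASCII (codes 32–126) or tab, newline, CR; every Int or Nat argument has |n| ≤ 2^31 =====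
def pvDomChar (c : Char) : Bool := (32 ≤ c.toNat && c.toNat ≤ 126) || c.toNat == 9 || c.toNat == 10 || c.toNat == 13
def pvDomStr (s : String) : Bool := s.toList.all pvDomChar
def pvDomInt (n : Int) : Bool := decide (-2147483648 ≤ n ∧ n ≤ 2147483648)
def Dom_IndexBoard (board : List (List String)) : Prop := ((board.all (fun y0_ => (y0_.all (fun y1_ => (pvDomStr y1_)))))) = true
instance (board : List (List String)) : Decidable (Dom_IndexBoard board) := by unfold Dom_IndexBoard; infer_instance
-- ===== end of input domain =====

-- B replaces A's nested most-significant-first Horner loop by flattening the board and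
-- scanning it back-to-front with an explicitly maintained power-of-three weight
-- (alternative decomposition, same cost).


-- ===== PORT A =====
-- Value(square): 2 if 'X', 1 if 'O', else 0
def pvValue (square : String) : Int :=
  if square == "X" then 2 else if square == "O" then 1 else 0

-- literal Horner loop: result = result*3 + Value(square) over rows, then squares
def IndexBoard (board : List (List String)) : Int :=
  board.foldl (fun result row => row.foldl (fun result square => result * 3 + pvValue square) result) 0

-- ===== PORT B =====
-- flatten the board, then one back-to-front pass keeping (total, power):
-- total += Value(square) * power; power *= 3
def IndexBoard_alt (board : List (List String)) : Int :=
  let squares := board.flatMap (fun row => row)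
  (squares.reverse.foldl
    (fun acc square => (acc.1 + pvValue square * acc.2, acc.2 * 3))
    ((0 : Int), (1 : Int))).1

-- ===== PRECONDITION & SPEC =====
def Spec_IndexBoard (board : List (List String)) (out : Int) : Prop := out = IndexBoard_alt board
instance (board : List (List String)) (out : Int) : Decidable (Spec_IndexBoard board out) := by unfold Spec_IndexBoard; infer_instance

-- ===== CLAIM (what is proved, stated in full; the proofs are below) =====
def Claim_equal_IndexBoard : Prop := ∀ (board : List (List String)), Dom_IndexBoard board → Spec_IndexBoard board (IndexBoard board)

-- ===== LEMMAS AND PROOFS =====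

-- Horner over a flat list, starting from r
def pvHorner (l : List String) (r : Int) : Int :=
  l.foldl (fun result square => result * 3 + pvValue square) r

theorem pvHorner_shift (l : List String) (r : Int) :
    pvHorner l r = r * 3 ^ l.length + pvHorner l 0 := by
  induction l generalizing r with
  | nil => simp [pvHorner]
  | cons x xs ih =>
    have h2 : pvHorner (x :: xs) 0 = pvHorner xs (0 * 3 + pvValue x) := rfl
    show pvHorner xs (r * 3 + pvValue x) = _
    rw [h2, ih (r * 3 + pvValue x), ih (0 * 3 + pvValue x), List.length_cons]
    ring

theorem pvRevFold (l : List String) (t p : Int) :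
    l.reverse.foldl (fun acc square => (acc.1 + pvValue square * acc.2, acc.2 * 3)) (t, p)
      = (t + p * pvHorner l 0, p * 3 ^ l.length) := by
  induction l generalizing t p with
  | nil => simp [pvHorner]
  | cons x xs ih =>
    rw [List.reverse_cons, List.foldl_append, ih]
    have hx : pvHorner (x :: xs) 0 = pvValue x * 3 ^ xs.length + pvHorner xs 0 := by
      show pvHorner xs (0 * 3 + pvValue x) = _
      rw [pvHorner_shift xs (0 * 3 + pvValue x)]
      ring
    simp only [List.foldl_cons, List.foldl_nil, hx, List.length_cons]
    rw [Prod.mk.injEq]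
    constructor <;> ring

-- ===== VERDICT (by name: the statement is the Claim_ definition above) =====
theorem IndexBoard_spec : Claim_equal_IndexBoard := by
  intro board _
  show IndexBoard board = IndexBoard_alt board
  have hfl : board.flatMap (fun row => row) = board.flatten := by simp [List.flatMap_def]
  have hB : IndexBoard_alt board = pvHorner board.flatten 0 := by
    unfold IndexBoard_alt
    rw [hfl]
    show (List.foldl (fun acc square => (acc.1 + pvValue square * acc.2, acc.2 * 3))
        ((0 : Int), (1 : Int)) board.flatten.reverse).1 = _
    rw [pvRevFold]
    simp
  rw [hB]
  unfold IndexBoard pvHorner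
  rw [← List.foldl_flatten]
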